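-- pv_equiv track=rewrite | github.com/EshanJayasundara/SinhalaTTS | data_prep.py | compute_durations
-- ===== SOURCE A (Python) =====
-- from typing import List, Tuple
--
-- def compute_durations(phonemes: List[str], mel_length: int) -> List[int]:
--     """Simple duration estimation - distribute frames evenly across phonemes."""
--     if not phonemes:
--         return []
--
--     base_duration = mel_length // len(phonemes)
--     remainder = mel_length % len(phonemes)
--
--     durations = [base_duration] * len(phonemes)
--     for i in range(remainder):
--         durations[i] += 1
--
--     return durations
-- ===== SOURCE B (Python) =====
-- def compute_durations(phonemes, mel_length):
--     """Simple duration estimation - distribute frames evenly across phonemes."""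
--     durations = []
--     remaining = mel_length
--     k = len(phonemes)
--     while k > 0:
--         d = -(-remaining // k)  # integer ceiling of remaining / k
--         durations.append(d)
--         remaining -= d
--         k -= 1
--     return durations
-- ===== Notes on version B (the rewrite author's own statement) =====
-- stated objective: alternative
-- what changed: Replaces A's divmod-then-increment-the-first-remainder-entries construction by a greedy single pass that assigns ceil(remaining/k) to each phoneme and subtracts it from the remaining frame count.
import Mathlib
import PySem

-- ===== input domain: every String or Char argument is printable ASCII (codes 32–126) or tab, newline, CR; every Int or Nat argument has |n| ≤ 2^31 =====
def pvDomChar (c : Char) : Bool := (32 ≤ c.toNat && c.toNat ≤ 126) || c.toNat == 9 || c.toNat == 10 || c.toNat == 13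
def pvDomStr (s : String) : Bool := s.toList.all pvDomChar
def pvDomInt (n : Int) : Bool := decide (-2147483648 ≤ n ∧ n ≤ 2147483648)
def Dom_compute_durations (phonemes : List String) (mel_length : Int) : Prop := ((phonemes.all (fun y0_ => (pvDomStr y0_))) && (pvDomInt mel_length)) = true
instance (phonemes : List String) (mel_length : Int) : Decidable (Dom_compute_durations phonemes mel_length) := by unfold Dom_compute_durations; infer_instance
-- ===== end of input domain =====

-- B replaces A's divmod-then-increment-first-remainder construction by a greedy single pass
-- assigning ceil(remaining/k) to each phoneme (objective: alternative, same cost).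

-- ===== PORT A =====
def compute_durations (phonemes : List String) (mel_length : Int) : List Int :=
  if phonemes = [] then []
  else
    let base_duration := PySem.Int.floordiv mel_length (phonemes.length : Int)
    let remainder := PySem.Int.mod mel_length (phonemes.length : Int)
    let durations := List.replicate phonemes.length base_duration
    -- for i in range(remainder): durations[i] += 1   (0 ≤ i < remainder < len, so plain get/set is exact)
    (PySem.List.pyRange 0 remainder 1).foldl
      (fun ds i => ds.set i.toNat (ds.getD i.toNat 0 + 1)) durations

-- ===== PORT B =====
-- while k > 0: d = -(-remaining // k); append d; remaining -= d; k -= 1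
def computeDurationsLoop : Nat → Int → List Int
  | 0, _ => []
  | k + 1, remaining =>
    let d := -(PySem.Int.floordiv (-remaining) ((k + 1 : Nat) : Int))
    d :: computeDurationsLoop k (remaining - d)

def compute_durations_alt (phonemes : List String) (mel_length : Int) : List Int :=
  computeDurationsLoop phonemes.length mel_length

-- ===== PRECONDITION & SPEC =====
def Spec_compute_durations (phonemes : List String) (mel_length : Int) (out : List Int) : Prop := out = compute_durations_alt phonemes mel_length
instance (phonemes : List String) (mel_length : Int) (out : List Int) : Decidable (Spec_compute_durations phonemes mel_length out) := by unfold Spec_compute_durations; infer_instance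

-- ===== CLAIM =====
def Claim_equal_compute_durations : Prop := ∀ (phonemes : List String) (mel_length : Int), Dom_compute_durations phonemes mel_length → Spec_compute_durations phonemes mel_length (compute_durations phonemes mel_length)

-- ===== LEMMAS AND PROOFS =====

-- A's increment loop over range(k) on n base cells yields the two-block list.
lemma foldl_inc_replicate (q : Int) (n k : Nat) (hk : k ≤ n) :
    (PySem.List.pyRange 0 (k : Int) 1).foldl
      (fun ds i => ds.set i.toNat (ds.getD i.toNat 0 + 1)) (List.replicate n q)
    = List.replicate k (q + 1) ++ List.replicate (n - k) q := by
  induction k with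
  | zero =>
    rw [PySem.List.pyRange_one_eq_nil (by omega)]
    simp
  | succ k ih =>
    have hk' : k ≤ n := by omega
    have : ((k : Int) + 1) = ((k + 1 : Nat) : Int) := by push_cast; ring
    rw [← this, PySem.List.pyRange_one_succ_right (by positivity), List.foldl_append,
        ih hk']
    have hnk : n - k = (n - (k + 1)) + 1 := by omega
    simp only [List.foldl_cons, List.foldl_nil, Int.toNat_natCast]
    rw [hnk, List.replicate_succ]
    have hget : (List.replicate k (q + 1) ++ q :: List.replicate (n - (k + 1)) q).getD k 0 = q := by
      simp
    have hset : ∀ v : Int, (List.replicate k (q + 1) ++ q :: List.replicate (n - (k + 1)) q).set k v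
        = List.replicate k (q + 1) ++ v :: List.replicate (n - (k + 1)) q := by
      intro v
      rw [List.set_append_right _ _ (by simp)]
      simp
    rw [hget, hset]
    rw [List.replicate_succ']; simp

-- B's greedy loop, started at the representation q*n + r with 0 ≤ r < n, yields the same two-block list.
lemma loop_eq_blocks (n : Nat) (q r : Int) (h0 : 0 ≤ r) (h1 : r = 0 ∨ r < (n : Int)) :
    computeDurationsLoop n (q * n + r)
    = List.replicate r.toNat (q + 1) ++ List.replicate (n - r.toNat) q := by
  induction n generalizing q r with
  | zero =>
    have : r.toNat = 0 := by omega
    simp [computeDurationsLoop, this]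
  | succ n ih =>
    have hpos : (0 : Int) < ((n + 1 : Nat) : Int) := by positivity
    by_cases hr : r = 0
    · subst hr
      have hd : -(PySem.Int.floordiv (-(q * ((n + 1 : Nat) : Int) + 0)) ((n + 1 : Nat) : Int)) = q := by
        rw [PySem.Int.neg_floordiv_neg_eq_iff_of_pos hpos]
        constructor <;> nlinarith
      rw [computeDurationsLoop, hd]
      have hrec : q * ((n + 1 : Nat) : Int) + 0 - q = q * (n : Int) + 0 := by push_cast; ring
      rw [hrec, ih q 0 le_rfl (Or.inl rfl)]
      simp [List.replicate_succ]
    · -- r > 0: d = q + 1, remainder becomes q * n + (r - 1)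
      have hrpos : 0 < r := lt_of_le_of_ne h0 (Ne.symm hr)
      have h1' : r < ((n + 1 : Nat) : Int) := h1.resolve_left hr
      have hd : -(PySem.Int.floordiv (-(q * ((n + 1 : Nat) : Int) + r)) ((n + 1 : Nat) : Int)) = q + 1 := by
        rw [PySem.Int.neg_floordiv_neg_eq_iff_of_pos hpos]
        constructor <;> nlinarith
      rw [computeDurationsLoop, hd]
      have hrec : q * ((n + 1 : Nat) : Int) + r - (q + 1) = q * (n : Int) + (r - 1) := by push_cast; ring
      rw [hrec, ih q (r - 1) (by omega) (by rcases h1 with h1 | h1 <;> push_cast at h1 ⊢ <;> omega)]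
      have hrt : r.toNat = (r - 1).toNat + 1 := by omega
      have hnt : (n + 1) - r.toNat = n - (r - 1).toNat := by omega
      rw [hrt, List.replicate_succ]
      simp [Nat.succ_sub_succ]

theorem compute_durations_spec_aux (phonemes : List String) (mel_length : Int) :
    compute_durations phonemes mel_length = compute_durations_alt phonemes mel_length := by
  unfold compute_durations compute_durations_alt
  by_cases h : phonemes = []
  · simp [h, computeDurationsLoop]
  · have hn : 0 < (phonemes.length : Int) := by
      simp [List.length_pos_iff, h]
    rw [if_neg h]
    set q := PySem.Int.floordiv mel_length (phonemes.length : Int) with hq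
    set r := PySem.Int.mod mel_length (phonemes.length : Int) with hr
    have h0 : 0 ≤ r := PySem.Int.mod_nonneg _ hn
    have h1 : r < (phonemes.length : Int) := PySem.Int.mod_lt _ hn
    have hrepr : mel_length = q * (phonemes.length : Int) + r := by
      have := PySem.Int.floordiv_mul_add_mod mel_length (phonemes.length : Int)
      rw [← hq, ← hr] at this; omega
    have hrt : r = ((r.toNat : Nat) : Int) := by omega
    rw [hrt] at *
    rw [foldl_inc_replicate _ _ _ (by omega)]
    rw [hrepr, loop_eq_blocks _ _ _ (by positivity) (Or.inr (by omega))]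

-- ===== VERDICT =====
theorem compute_durations_spec : Claim_equal_compute_durations := by
  intro phonemes mel_length _
  exact compute_durations_spec_aux phonemes mel_length
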